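-- pv_equiv track=rewrite | github.com/neel7h/engineering | analyze/extensions/com.castsoftware.wbslinker.1.6.9/rest_linking.py | match_end
-- ===== SOURCE A (Python) =====
-- def is_parameter(url_path_fragment):
--     """
--     Given an url path fragment, say if it is of the form {...} or empty (objective-c)
--     """
--
--     if not url_path_fragment:
--         return True # special case for objective-c which is very limited in string evaluations
--
--     return  url_path_fragment.startswith('{') and url_path_fragment.endswith('}')
--
-- def match_end(call_elements, receive_elements, common_names):
--     """
--     True when one end is included in the other.
--
--     b/{}, a/b/c
--     a/b/{}, b/{}
--     etc..;
--
--     """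
--     # recursion stop
--     if not receive_elements:
--         return True
--
--     # recursion stop
--     if not call_elements:
--         return True
--
--     # compare last elements of list
--     call_element = call_elements[-1].lower()
--     receive_element = receive_elements[-1].lower()
--
--
--     # if receive is {}, then keep going
--     # if both are equals also
--     if (is_parameter(receive_element) and call_element not in common_names) or call_element == receive_element:
--         return match_end(call_elements[:-1], receive_elements[:-1], common_names)
--
--     # otherwise...
--     return False
-- ===== SOURCE B (Python) =====
-- def _passes(call_element, receive_element, common):
--     return (call_element == receive_element
--             or ((not receive_element
--                  or (receive_element.startswith('{') and receive_element.endswith('}')))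
--                 and call_element not in common))
--
--
-- def match_end(call_elements, receive_elements, common_names):
--     common = set(common_names)
--     for c, r in zip(reversed(call_elements), reversed(receive_elements)):
--         if not _passes(c.lower(), r.lower(), common):
--             return False
--     return True
-- ===== Notes on version B (the rewrite author's own statement) =====
-- stated objective: faster
-- what changed: Replaces the recursive slicing (each step copies both lists with [:-1]) by a single iterative pass over zip(reversed(...), reversed(...)) with a set for the common_names membership test.
import Mathlib
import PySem

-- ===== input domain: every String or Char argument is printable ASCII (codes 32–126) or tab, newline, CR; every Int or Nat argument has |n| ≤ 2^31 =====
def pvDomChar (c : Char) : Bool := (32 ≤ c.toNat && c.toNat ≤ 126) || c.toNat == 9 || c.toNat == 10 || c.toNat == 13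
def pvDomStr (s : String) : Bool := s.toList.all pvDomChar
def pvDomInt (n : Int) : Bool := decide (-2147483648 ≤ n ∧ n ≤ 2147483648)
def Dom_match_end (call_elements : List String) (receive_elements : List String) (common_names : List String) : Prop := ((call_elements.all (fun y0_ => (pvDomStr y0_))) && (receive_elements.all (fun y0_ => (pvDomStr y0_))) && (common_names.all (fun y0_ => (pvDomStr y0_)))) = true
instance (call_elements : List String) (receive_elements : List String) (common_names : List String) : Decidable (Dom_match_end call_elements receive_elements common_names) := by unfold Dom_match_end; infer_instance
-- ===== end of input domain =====

-- B replaces A's recursive [:-1] slicing by a single pass over zip(reversed, reversed) with a set; objective: faster.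

-- ===== PORT A =====
def is_parameter (url_path_fragment : String) : Bool :=
  if url_path_fragment == "" then true
  else PySem.Str.startswith url_path_fragment "{" && PySem.Str.endswith url_path_fragment "}"

def match_end (call_elements : List String) (receive_elements : List String) (common_names : List String) : Bool :=
  if _h1 : receive_elements = [] then true
  else if _h2 : call_elements = [] then true
  else
    let call_element := PySem.Str.lower ((PySem.List.pyGet? call_elements (-1)).getD "")
    let receive_element := PySem.Str.lower ((PySem.List.pyGet? receive_elements (-1)).getD "")
    if (is_parameter receive_element && !(common_names.contains call_element)) || call_element == receive_element then
      match_end (PySem.List.slice call_elements none (some (-1))) (PySem.List.slice receive_elements none (some (-1))) common_names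
    else false
termination_by receive_elements.length
decreasing_by
  simp only [PySem.List.slice_to_neg_one, List.length_dropLast]
  exact Nat.sub_lt (List.length_pos_of_ne_nil _h1) one_pos

-- ===== PORT B =====
def pv_passes (call_element : String) (receive_element : String) (common : PySem.Set String) : Bool :=
  call_element == receive_element
    || ((receive_element == ""
          || (PySem.Str.startswith receive_element "{" && PySem.Str.endswith receive_element "}"))
        && !(PySem.Set.contains common call_element))

def match_end_alt (call_elements : List String) (receive_elements : List String) (common_names : List String) : Bool :=
  let common := PySem.Set.ofList common_names
  (List.zip call_elements.reverse receive_elements.reverse).all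
    (fun p => pv_passes (PySem.Str.lower p.1) (PySem.Str.lower p.2) common)

-- ===== PRECONDITION & SPEC =====
def Spec_match_end (call_elements : List String) (receive_elements : List String) (common_names : List String) (out : Bool) : Prop := out = match_end_alt call_elements receive_elements common_names
instance (call_elements : List String) (receive_elements : List String) (common_names : List String) (out : Bool) : Decidable (Spec_match_end call_elements receive_elements common_names out) := by unfold Spec_match_end; infer_instance

-- ===== CLAIM (what is proved, stated in full; the proofs are below) =====
def Claim_equal_match_end : Prop := ∀ (call_elements : List String) (receive_elements : List String) (common_names : List String), Dom_match_end call_elements receive_elements common_names → Spec_match_end call_elements receive_elements common_names (match_end call_elements receive_elements common_names)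

-- ===== LEMMAS AND PROOFS =====

theorem contains_ofList_eq (cn : List String) (c : String) :
    PySem.Set.contains (PySem.Set.ofList cn) c = cn.contains c := by
  rw [Bool.eq_iff_iff]
  simp [PySem.Set.contains, PySem.Set.mem_ofList]

theorem pv_passes_eq (c r : String) (cn : List String) :
    pv_passes c r (PySem.Set.ofList cn) =
      ((is_parameter r && !(cn.contains c)) || c == r) := by
  unfold pv_passes is_parameter
  rw [contains_ofList_eq]
  cases h : (r == "") <;> simp [Bool.or_comm]

theorem alt_step (a b cn : List String) (ha : a ≠ []) (hb : b ≠ []) :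
    match_end_alt a b cn =
      (pv_passes (PySem.Str.lower (a.getLast ha)) (PySem.Str.lower (b.getLast hb)) (PySem.Set.ofList cn)
        && match_end_alt a.dropLast b.dropLast cn) := by
  unfold match_end_alt
  conv_lhs => rw [← List.dropLast_append_getLast ha, ← List.dropLast_append_getLast hb]
  simp

theorem getD_pyGet_neg_one (a : List String) (ha : a ≠ []) :
    (PySem.List.pyGet? a (-1)).getD "" = a.getLast ha := by
  rw [PySem.List.pyGet?_neg_one, List.getLast?_eq_some_getLast ha]
  rfl

theorem match_end_eq_alt (call_elements receive_elements common_names : List String) :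
    match_end call_elements receive_elements common_names =
      match_end_alt call_elements receive_elements common_names := by
  fun_induction match_end call_elements receive_elements common_names with
  | case1 ce => simp [match_end_alt]
  | case2 re _ => simp [match_end_alt]
  | case3 a b hb ha e f g ih =>
    rw [PySem.List.slice_to_neg_one, PySem.List.slice_to_neg_one] at ih ⊢
    rw [ih, alt_step a b common_names ha hb, pv_passes_eq]
    have he : e = PySem.Str.lower (a.getLast ha) := by
      rw [show e = PySem.Str.lower ((PySem.List.pyGet? a (-1)).getD "") from rfl, getD_pyGet_neg_one a ha]
    have hf : f = PySem.Str.lower (b.getLast hb) := by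
      rw [show f = PySem.Str.lower ((PySem.List.pyGet? b (-1)).getD "") from rfl, getD_pyGet_neg_one b hb]
    rw [he, hf] at g
    rw [g, Bool.true_and]
  | case4 a b hb ha e f g =>
    rw [alt_step a b common_names ha hb, pv_passes_eq]
    have he : e = PySem.Str.lower (a.getLast ha) := by
      rw [show e = PySem.Str.lower ((PySem.List.pyGet? a (-1)).getD "") from rfl, getD_pyGet_neg_one a ha]
    have hf : f = PySem.Str.lower (b.getLast hb) := by
      rw [show f = PySem.Str.lower ((PySem.List.pyGet? b (-1)).getD "") from rfl, getD_pyGet_neg_one b hb]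
    rw [Bool.not_eq_true] at g
    rw [he, hf] at g
    rw [g, Bool.false_and]

-- ===== VERDICT (by name: the statement is the Claim_ definition above) =====
theorem match_end_spec : Claim_equal_match_end := by
  intro ce re cn _
  unfold Spec_match_end
  exact match_end_eq_alt ce re cn
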